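-- pv_equiv track=rewrite | github.com/justinforbes/refinery | refinery/lib/scripts/js/deobfuscation/helpers.py | js_parse_int
-- ===== SOURCE A (Python) =====
-- def js_parse_int(s: str, radix: int = 10) -> int | None:
--     """
--     Replicate the semantics of JavaScript's ``parseInt(string, radix)``. Strips leading whitespace,
--     handles an optional ``+``/``-`` sign, and for radix 16 skips a leading ``0x``/``0X`` prefix.
--     Parses leading characters valid for the given radix (2-36) and stops at the first invalid one.
--     Returns ``None`` when no valid digits are found (JS would return ``NaN``).
--     """
--     if radix == 0:
--         radix = 10
--     if not (2 <= radix <= 36):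
--         return None
--     s = s.strip()
--     if not s:
--         return None
--     sign = 1
--     if s[0] in '+-':
--         if s[0] == '-':
--             sign = -1
--         s = s[1:]
--     if radix == 16 and len(s) >= 2 and s[0] == '0' and s[1] in 'xX':
--         s = s[2:]
--     digits: list[str] = []
--     for ch in s:
--         if '0' <= ch <= '9':
--             if ord(ch) - ord('0') >= radix:
--                 break
--             digits.append(ch)
--         elif 'a' <= ch <= 'z' or 'A' <= ch <= 'Z':
--             if ord(ch.lower()) - ord('a') + 10 >= radix:
--                 break
--             digits.append(ch)
--         else:
--             break
--     if not digits:
--         return None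
--     return sign * int(''.join(digits), radix)
-- ===== SOURCE B (Python) =====
-- DIGITS = '0123456789abcdefghijklmnopqrstuvwxyz'
--
--
-- def js_parse_int(s: str, radix: int = 10) -> int | None:
--     """JS parseInt: one-pass Horner accumulation instead of collect-then-int."""
--     if radix == 0:
--         radix = 10
--     if not 2 <= radix <= 36:
--         return None
--     t = s.strip()
--     sign = -1 if t[:1] == '-' else 1
--     if t[:1] in ('+', '-'):
--         t = t[1:]
--     if radix == 16 and t[:2].lower() == '0x':
--         t = t[2:]
--     value = None
--     for ch in t:
--         d = DIGITS.find(ch.lower())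
--         if not 0 <= d < radix:
--             break
--         value = (0 if value is None else value) * radix + d
--     return None if value is None else sign * value
-- ===== Notes on version B (the rewrite author's own statement) =====
-- stated objective: alternative
-- what changed: A collects the valid digit characters into a list via per-character range tests and then converts the joined string with int(s, radix); B does a single pass that classifies each character by its index in a digit-alphabet string and accumulates the value directly by Horner's rule, never building the digit list or calling int().
import Mathlib
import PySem

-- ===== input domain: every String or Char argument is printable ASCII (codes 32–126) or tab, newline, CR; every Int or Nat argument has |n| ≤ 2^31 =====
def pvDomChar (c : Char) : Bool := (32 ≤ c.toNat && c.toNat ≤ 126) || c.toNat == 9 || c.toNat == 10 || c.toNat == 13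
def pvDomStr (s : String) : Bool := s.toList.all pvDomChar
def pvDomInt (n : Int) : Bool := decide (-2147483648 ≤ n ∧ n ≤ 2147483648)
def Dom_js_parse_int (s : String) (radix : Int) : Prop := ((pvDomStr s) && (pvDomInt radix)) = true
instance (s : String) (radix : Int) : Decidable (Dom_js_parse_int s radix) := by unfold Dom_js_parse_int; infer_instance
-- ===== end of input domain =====

-- B replaces A's collect-digit-characters-then-int() two-phase loop by a single-pass Horner
-- accumulation with a digit-alphabet index lookup (objective: alternative / more idiomatic).

-- ===== PORT A =====
-- value of one digit character, used to port A's `int(''.join(digits), radix)` BY HAND: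
-- at that call site `digits` is a nonempty run of ASCII digits/letters each valid for radix,
-- with no sign, whitespace or underscore, and there CPython's int(s, radix) is exactly
-- positional (base-radix) evaluation with these per-character values; the hand port is
-- exact on every input this function can pass to it.
def jsDigitVal (c : Char) : Int :=
  if '0' ≤ c ∧ c ≤ '9' then (c.toNat : Int) - 48
  else ((PySem.Chars.lowerChar c).toNat : Int) - 87

-- A's for-loop with break, collecting the digit characters
def jsCollect (radix : Int) : List Char → List Char
  | [] => []
  | c :: r =>
    if '0' ≤ c ∧ c ≤ '9' then
      if radix ≤ (c.toNat : Int) - 48 then [] else c :: jsCollect radix r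
    else if ('a' ≤ c ∧ c ≤ 'z') ∨ ('A' ≤ c ∧ c ≤ 'Z') then
      if radix ≤ ((PySem.Chars.lowerChar c).toNat : Int) - 97 + 10 then []
      else c :: jsCollect radix r
    else []

-- sign = 1; if s[0] in '+-': (sign = -1 if s[0] == '-'); s = s[1:]   (s nonempty here)
def jsSign (cs : List Char) : Int × List Char :=
  if cs.head? = some '+' ∨ cs.head? = some '-' then
    (if cs.head? = some '-' then -1 else 1, PySem.List.slice cs (some 1) none)
  else (1, cs)

-- if radix == 16 and len(s) >= 2 and s[0] == '0' and s[1] in 'xX': s = s[2:]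
def jsHexSkip (radix : Int) (cs : List Char) : List Char :=
  if radix = 16 ∧ 2 ≤ cs.length ∧ PySem.List.pyGet? cs 0 = some '0' ∧
      (PySem.List.pyGet? cs 1 = some 'x' ∨ PySem.List.pyGet? cs 1 = some 'X')
  then PySem.List.slice cs (some 2) none else cs

def js_parse_int (s : String) (radix : Int) : Option Int :=
  let radix := if radix = 0 then 10 else radix
  if ¬ (2 ≤ radix ∧ radix ≤ 36) then none else
  let cs := PySem.Chars.strip s.toList
  if cs = [] then none else
  let sr := jsSign cs
  let cs2 := jsHexSkip radix sr.2
  let ds := jsCollect radix cs2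
  if ds = [] then none
  else some (sr.1 * ds.foldl (fun a c => a * radix + jsDigitVal c) 0)

-- ===== PORT B =====
-- the characters of Source B's DIGITS string '0123456789abcdefghijklmnopqrstuvwxyz'
def pvDIGITS : List Char := ['0','1','2','3','4','5','6','7','8','9','a','b','c','d','e','f','g','h','i','j','k','l','m','n','o','p','q','r','s','t','u','v','w','x','y','z']

-- sign = -1 if t[:1] == '-' else 1
def jsAltSign (t : List Char) : Int :=
  if PySem.List.slice t none (some 1) = ['-'] then -1 else 1

-- if t[:1] in ('+', '-'): t = t[1:]
def jsAltStripSign (t : List Char) : List Char :=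
  if PySem.List.slice t none (some 1) = ['+'] ∨ PySem.List.slice t none (some 1) = ['-']
  then PySem.List.slice t (some 1) none else t

-- if radix == 16 and t[:2].lower() == '0x': t = t[2:]
def jsAltHexSkip (radix : Int) (t : List Char) : List Char :=
  if radix = 16 ∧ PySem.Chars.lower (PySem.List.slice t none (some 2)) = ['0', 'x']
  then PySem.List.slice t (some 2) none else t

-- B's single loop: Option accumulator, digit value = index in the digit alphabet
def jsAltLoop (radix : Int) : List Char → Option Int → Option Int
  | [], acc => acc
  | c :: r, acc =>
    let d := PySem.Chars.find pvDIGITS [PySem.Chars.lowerChar c]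
    if ¬ (0 ≤ d ∧ d < radix) then acc
    else jsAltLoop radix r (some (acc.getD 0 * radix + d))

def js_parse_int_alt (s : String) (radix : Int) : Option Int :=
  let radix := if radix = 0 then 10 else radix
  if ¬ (2 ≤ radix ∧ radix ≤ 36) then none else
  let t := PySem.Chars.strip s.toList
  let sign := jsAltSign t
  let t := jsAltStripSign t
  let t := jsAltHexSkip radix t
  match jsAltLoop radix t none with
  | none => none
  | some v => some (sign * v)

-- ===== PRECONDITION & SPEC =====
def Spec_js_parse_int (s : String) (radix : Int) (out : Option Int) : Prop := out = js_parse_int_alt s radix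
instance (s : String) (radix : Int) (out : Option Int) : Decidable (Spec_js_parse_int s radix out) := by unfold Spec_js_parse_int; infer_instance

-- ===== CLAIM (what is proved, stated in full; the proofs are below) =====
def Claim_equal_js_parse_int : Prop := ∀ (s : String) (radix : Int), Dom_js_parse_int s radix → Spec_js_parse_int s radix (js_parse_int s radix)

-- ===== LEMMAS AND PROOFS =====

-- the per-character bridge between A's range tests and B's alphabet lookup
def pvCharFact (c : Char) : Prop :=
  (('0' ≤ c ∧ c ≤ '9') →
    PySem.Chars.find pvDIGITS [PySem.Chars.lowerChar c] = (c.toNat : Int) - 48 ∧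
    (0 : Int) ≤ (c.toNat : Int) - 48 ∧ (c.toNat : Int) - 48 ≤ 9) ∧
  (¬ ('0' ≤ c ∧ c ≤ '9') → (('a' ≤ c ∧ c ≤ 'z') ∨ ('A' ≤ c ∧ c ≤ 'Z')) →
    PySem.Chars.find pvDIGITS [PySem.Chars.lowerChar c] = ((PySem.Chars.lowerChar c).toNat : Int) - 87 ∧
    (10 : Int) ≤ ((PySem.Chars.lowerChar c).toNat : Int) - 87 ∧
    ((PySem.Chars.lowerChar c).toNat : Int) - 87 ≤ 35) ∧
  (¬ ('0' ≤ c ∧ c ≤ '9') → ¬ (('a' ≤ c ∧ c ≤ 'z') ∨ ('A' ≤ c ∧ c ≤ 'Z')) →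
    PySem.Chars.find pvDIGITS [PySem.Chars.lowerChar c] < 0) ∧
  (PySem.Chars.lowerChar c = '0' ↔ c = '0') ∧
  (PySem.Chars.lowerChar c = 'x' ↔ (c = 'x' ∨ c = 'X'))

-- the same statement as a boolean, evaluated once over all code points < 127
def pvCharFactB (c : Char) : Bool :=
  decide ((('0' ≤ c ∧ c ≤ '9') →
    PySem.Chars.find pvDIGITS [PySem.Chars.lowerChar c] = (c.toNat : Int) - 48 ∧
    (0 : Int) ≤ (c.toNat : Int) - 48 ∧ (c.toNat : Int) - 48 ≤ 9) ∧
  (¬ ('0' ≤ c ∧ c ≤ '9') → (('a' ≤ c ∧ c ≤ 'z') ∨ ('A' ≤ c ∧ c ≤ 'Z')) →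
    PySem.Chars.find pvDIGITS [PySem.Chars.lowerChar c] = ((PySem.Chars.lowerChar c).toNat : Int) - 87 ∧
    (10 : Int) ≤ ((PySem.Chars.lowerChar c).toNat : Int) - 87 ∧
    ((PySem.Chars.lowerChar c).toNat : Int) - 87 ≤ 35) ∧
  (¬ ('0' ≤ c ∧ c ≤ '9') → ¬ (('a' ≤ c ∧ c ≤ 'z') ∨ ('A' ≤ c ∧ c ≤ 'Z')) →
    PySem.Chars.find pvDIGITS [PySem.Chars.lowerChar c] < 0) ∧
  (PySem.Chars.lowerChar c = '0' ↔ c = '0') ∧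
  (PySem.Chars.lowerChar c = 'x' ↔ (c = 'x' ∨ c = 'X')))

theorem factB_imp (c : Char) (hb : pvCharFactB c = true) : pvCharFact c := by
  unfold pvCharFact
  exact of_decide_eq_true hb

set_option maxRecDepth 100000 in
set_option maxHeartbeats 1000000 in
theorem pvCharFactB_all : (List.range 127).all (fun n => pvCharFactB (Char.ofNat n)) = true := by
  decide

theorem pvCharFact_of_dom (c : Char) (hc : pvDomChar c = true) : pvCharFact c := by
  have h127 : c.toNat < 127 := by
    simp only [pvDomChar, Bool.or_eq_true, Bool.and_eq_true, decide_eq_true_eq, beq_iff_eq] at hc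
    omega
  refine factB_imp c ?_
  have hb := List.all_eq_true.mp pvCharFactB_all c.toNat (List.mem_range.mpr h127)
  rwa [Char.ofNat_toNat] at hb

theorem mem_strip {c : Char} {l : List Char} (h : c ∈ PySem.Chars.strip l) : c ∈ l := by
  simp only [PySem.Chars.strip, PySem.Chars.rstrip, PySem.Chars.lstrip] at h
  have h1 := List.mem_reverse.mp h
  have h2 := (List.dropWhile_sublist (l := (List.dropWhile PySem.Chars.isspace l).reverse)
      PySem.Chars.isspace).mem h1
  have h3 := List.mem_reverse.mp h2
  exact (List.dropWhile_sublist (l := l) PySem.Chars.isspace).mem h3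

-- slices with the tiny literal bounds the two prologues use
theorem slice_to_one (t : List Char) : PySem.List.slice t none (some 1) = t.take 1 :=
  PySem.List.slice_to t (by norm_num)

theorem slice_from_one (t : List Char) : PySem.List.slice t (some 1) none = t.drop 1 :=
  PySem.List.slice_from t (by norm_num)

theorem slice_to_two (t : List Char) : PySem.List.slice t none (some 2) = t.take 2 :=
  PySem.List.slice_to t (by norm_num)

theorem slice_from_two (t : List Char) : PySem.List.slice t (some 2) none = t.drop 2 :=
  PySem.List.slice_from t (by norm_num)

theorem pyGet_one {α : Type} (a b : α) (l : List α) :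
    PySem.List.pyGet? (a :: b :: l) 1 = some b := by
  simp [PySem.List.pyGet?, PySem.List.pyIdx?]

-- the two sign prologues compute the same sign and tail
theorem sign_eq (t : List Char) : jsAltSign t = (jsSign t).1 := by
  unfold jsAltSign jsSign
  rw [slice_to_one]
  cases t with
  | nil => simp
  | cons c r =>
    by_cases hm : c = '-'
    · simp [hm]
    · by_cases hp : c = '+' <;> simp [hm, hp]

theorem strip_sign_eq (t : List Char) : jsAltStripSign t = (jsSign t).2 := by
  unfold jsAltStripSign jsSign
  rw [slice_to_one, slice_from_one]
  cases t with
  | nil => simp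
  | cons c r =>
    by_cases hm : c = '-'
    · simp [hm]
    · by_cases hp : c = '+' <;> simp [hm, hp]

theorem mem_jsSign_snd {c : Char} {t : List Char} (h : c ∈ (jsSign t).2) : c ∈ t := by
  unfold jsSign at h
  split at h
  · rw [slice_from_one] at h
    exact List.mem_of_mem_drop h
  · exact h

-- the 0x/0X prefix skips agree (per-character facts bridge the two tests)
theorem hex_skip_eq (radix : Int) (t : List Char) (hdom : ∀ c ∈ t, pvDomChar c = true) :
    jsAltHexSkip radix t = jsHexSkip radix t := by
  unfold jsAltHexSkip jsHexSkip
  rw [slice_to_two]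
  match t with
  | [] => simp [PySem.Chars.lower]
  | [a] => simp [PySem.Chars.lower]
  | a :: b :: r =>
    obtain ⟨-, -, -, ha0, -⟩ := pvCharFact_of_dom a (hdom a (by simp))
    obtain ⟨-, -, -, -, hbx⟩ := pvCharFact_of_dom b (hdom b (by simp))
    rw [PySem.List.pyGet?_zero_cons, pyGet_one]
    have hcond : (PySem.Chars.lower ((a :: b :: r).take 2) = ['0', 'x']) ↔
        (2 ≤ (a :: b :: r).length ∧ some a = some '0' ∧
          (some b = some 'x' ∨ some b = some 'X')) := by
      simp only [List.take, PySem.Chars.lower, List.map, List.length_cons,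
        Option.some.injEq, List.cons.injEq, and_true]
      constructor
      · rintro ⟨h0, hx⟩
        refine ⟨by omega, ha0.mp h0, ?_⟩
        rcases hbx.mp hx with h | h
        · exact Or.inl h
        · exact Or.inr h
      · rintro ⟨-, h0, hx⟩
        subst h0
        refine ⟨ha0.mpr rfl, ?_⟩
        rcases hx with h | h <;> subst h
        · exact hbx.mpr (Or.inl rfl)
        · exact hbx.mpr (Or.inr rfl)
    by_cases h16 : radix = 16
    · by_cases hc : PySem.Chars.lower ((a :: b :: r).take 2) = ['0', 'x']
      · rw [if_pos ⟨h16, hc⟩, if_pos ⟨h16, hcond.mp hc⟩]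
      · rw [if_neg (by rintro ⟨-, h⟩; exact hc h),
            if_neg (by rintro ⟨-, h⟩; exact hc (hcond.mpr h))]
    · rw [if_neg (by rintro ⟨h, -⟩; exact h16 h), if_neg (by rintro ⟨h, -⟩; exact h16 h)]

theorem mem_jsHexSkip {c : Char} {radix : Int} {t : List Char} (h : c ∈ jsHexSkip radix t) :
    c ∈ t := by
  unfold jsHexSkip at h
  split at h
  · rw [slice_from_two] at h
    exact List.mem_of_mem_drop h
  · exact h

-- B's loop on a `some` accumulator is A's fold over the collected digits
theorem loop_some (radix : Int) :
    ∀ (cs : List Char), (∀ c ∈ cs, pvDomChar c = true) → ∀ a : Int,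
    jsAltLoop radix cs (some a) =
      some ((jsCollect radix cs).foldl (fun a c => a * radix + jsDigitVal c) a) := by
  intro cs
  induction cs with
  | nil => intro _ a; simp [jsAltLoop, jsCollect]
  | cons c r ih =>
    intro hdom a
    obtain ⟨hdig, hlet, hbad, -, -⟩ := pvCharFact_of_dom c (hdom c (by simp))
    have hr' : ∀ c' ∈ r, pvDomChar c' = true := fun c' h => hdom c' (by simp [h])
    by_cases h1 : ('0' ≤ c ∧ c ≤ '9')
    · obtain ⟨hd, hd0, hd9⟩ := hdig h1
      by_cases h2 : radix ≤ (c.toNat : Int) - 48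
      · simp only [jsAltLoop, jsCollect, hd, if_pos h1, if_pos h2]
        rw [if_pos (by omega)]
        simp
      · simp only [jsAltLoop, jsCollect, hd, if_pos h1, if_neg h2]
        rw [if_neg (by omega), ih hr' _]
        simp [jsDigitVal, if_pos h1]
    · by_cases h2 : (('a' ≤ c ∧ c ≤ 'z') ∨ ('A' ≤ c ∧ c ≤ 'Z'))
      · obtain ⟨hd, hd10, hd35⟩ := hlet h1 h2
        by_cases h3 : radix ≤ ((PySem.Chars.lowerChar c).toNat : Int) - 97 + 10
        · simp only [jsAltLoop, jsCollect, hd, if_neg h1, if_pos h2, if_pos h3]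
          rw [if_pos (by omega)]
          simp
        · simp only [jsAltLoop, jsCollect, hd, if_neg h1, if_pos h2, if_neg h3]
          rw [if_neg (by omega), ih hr' _]
          have hjv : ((PySem.Chars.lowerChar c).toNat : Int) - 87 = jsDigitVal c := by
            simp [jsDigitVal, if_neg h1]
          rw [hjv]
          simp
      · have hd := hbad h1 h2
        simp only [jsAltLoop, jsCollect, if_neg h1, if_neg h2]
        rw [if_pos (by omega)]
        simp

-- B's loop on the `none` accumulator vs A's emptiness test on the collected digits
theorem loop_none (radix : Int)
    (cs : List Char) (hdom : ∀ c ∈ cs, pvDomChar c = true) :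
    jsAltLoop radix cs none =
      if jsCollect radix cs = [] then none
      else some ((jsCollect radix cs).foldl (fun a c => a * radix + jsDigitVal c) 0) := by
  cases cs with
  | nil => simp [jsAltLoop, jsCollect]
  | cons c r =>
    obtain ⟨hdig, hlet, hbad, -, -⟩ := pvCharFact_of_dom c (hdom c (by simp))
    have hr' : ∀ c' ∈ r, pvDomChar c' = true := fun c' h => hdom c' (by simp [h])
    by_cases h1 : ('0' ≤ c ∧ c ≤ '9')
    · obtain ⟨hd, hd0, hd9⟩ := hdig h1
      by_cases h2 : radix ≤ (c.toNat : Int) - 48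
      · simp only [jsAltLoop, jsCollect, hd, if_pos h1, if_pos h2]
        rw [if_pos (by omega)]
        simp
      · simp only [jsAltLoop, jsCollect, hd, if_pos h1, if_neg h2]
        rw [if_neg (by omega), loop_some radix r hr' _]
        have hne : (c :: jsCollect radix r : List Char) ≠ [] := by simp
        rw [if_neg hne]
        simp [jsDigitVal, if_pos h1]
    · by_cases h2 : (('a' ≤ c ∧ c ≤ 'z') ∨ ('A' ≤ c ∧ c ≤ 'Z'))
      · obtain ⟨hd, hd10, hd35⟩ := hlet h1 h2
        by_cases h3 : radix ≤ ((PySem.Chars.lowerChar c).toNat : Int) - 97 + 10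
        · simp only [jsAltLoop, jsCollect, hd, if_neg h1, if_pos h2, if_pos h3]
          rw [if_pos (by omega)]
          simp
        · simp only [jsAltLoop, jsCollect, hd, if_neg h1, if_pos h2, if_neg h3]
          rw [if_neg (by omega), loop_some radix r hr' _]
          have hne : (c :: jsCollect radix r : List Char) ≠ [] := by simp
          rw [if_neg hne]
          have hjv : ((PySem.Chars.lowerChar c).toNat : Int) - 87 = jsDigitVal c := by
            simp [jsDigitVal, if_neg h1]
          rw [hjv]
          simp
      · have hd := hbad h1 h2
        simp only [jsAltLoop, jsCollect, if_neg h1, if_neg h2]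
        rw [if_pos (by omega)]
        simp

-- ===== VERDICT (by name: the statement is the Claim_ definition above) =====
theorem js_parse_int_spec : Claim_equal_js_parse_int := by
  intro s radix hdom
  unfold Spec_js_parse_int
  have hdomS : ∀ c ∈ s.toList, pvDomChar c = true := by
    have hs : pvDomStr s = true := ((Bool.and_eq_true _ _).mp hdom).1
    simpa [pvDomStr, List.all_eq_true] using hs
  simp only [js_parse_int, js_parse_int_alt]
  by_cases hr : 2 ≤ (if radix = 0 then 10 else radix) ∧ (if radix = 0 then 10 else radix) ≤ 36
  case neg => rw [if_pos hr, if_pos hr]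
  rw [if_neg (not_not_intro hr), if_neg (not_not_intro hr)]
  have hstrip : ∀ c ∈ PySem.Chars.strip s.toList, pvDomChar c = true :=
    fun c h => hdomS c (mem_strip h)
  set rx := if radix = 0 then 10 else radix with hrx
  set cs := PySem.Chars.strip s.toList with hcs
  have hdom2 : ∀ c ∈ (jsSign cs).2, pvDomChar c = true :=
    fun c h => hstrip c (mem_jsSign_snd h)
  have hdom3 : ∀ c ∈ jsHexSkip rx (jsSign cs).2, pvDomChar c = true :=
    fun c h => hdom2 c (mem_jsHexSkip h)
  rw [sign_eq, strip_sign_eq, hex_skip_eq rx _ hdom2, loop_none rx _ hdom3]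
  by_cases hnil : cs = []
  · rw [if_pos hnil, hnil]
    simp [jsSign, jsHexSkip, jsCollect]
  · rw [if_neg hnil]
    by_cases hds : jsCollect rx (jsHexSkip rx (jsSign cs).2) = []
    · simp [hds]
    · simp [hds]
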